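-- pv_equiv track=rewrite | github.com/coleellison/math | linearalgebra.py | augment_identity
-- ===== SOURCE A (Python) =====
-- def augment_identity(Matrix):
--     """
--
--     Helper function for inverse()
--
--     Parameters
--     ----------
--     Matrix : 2-D array
--         the input matrix
--
--     Returns
--     -------
--     augmented_matrix : 2-D array
--         the matrix augmented with the identity matrix of same size
--
--     """
--     if len(Matrix) != len(Matrix[0]):
--         raise Exception("Error: The matrix is not square")
--     else:
--         size = len(Matrix)
--         identity_matrix = identity(size)
--         augmented_matrix = []
--         for row_index in range(len(Matrix)):
--             new_row = Matrix[row_index] + identity_matrix[row_index] #combine the original matrix row with the identity matrix row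
--             augmented_matrix.append(new_row)
--         return augmented_matrix
--
-- def identity(N, c = 1):
--     """
--
--     Helper function for inverse()
--
--     Parameters
--     ----------
--     N : int
--         size of the matrix
--     c : int
--         scalar for the identity
--
--     Returns
--     -------
--     id_matrix : 2-D array
--         identity matrix of size N
--     """
--     id_matrix = []
--     for i in range(N):
--         id_matrix.append([0] * N) #make a zero matrix
--     for i in range(N):
--         id_matrix[i][i] = c #c remains 1 for all inverse operations, but it is helpful for A - lambda(I) calculations in eigenspaces
--     return id_matrix
-- ===== SOURCE B (Python) =====
-- def augment_identity(Matrix):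
--     if len(Matrix) != len(Matrix[0]):
--         raise Exception("Error: The matrix is not square")
--     augmented_matrix = []
--     e = [1] + [0] * (len(Matrix) - 1)  # rotating unit vector: identity row for the current position
--     for row in Matrix:
--         augmented_matrix.append(row + e)
--         e = [e[-1]] + e[:-1]  # rotate right: next identity row
--     return augmented_matrix
-- ===== Notes on version B (the rewrite author's own statement) =====
-- stated objective: alternative
-- what changed: B never builds or indexes an identity matrix: it folds once over the rows carrying a rotating unit vector (rotate-right after each row) as the identity row to append, replacing A's zero-fill pass, diagonal-set pass and index-based concatenation loop.
import Mathlib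
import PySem

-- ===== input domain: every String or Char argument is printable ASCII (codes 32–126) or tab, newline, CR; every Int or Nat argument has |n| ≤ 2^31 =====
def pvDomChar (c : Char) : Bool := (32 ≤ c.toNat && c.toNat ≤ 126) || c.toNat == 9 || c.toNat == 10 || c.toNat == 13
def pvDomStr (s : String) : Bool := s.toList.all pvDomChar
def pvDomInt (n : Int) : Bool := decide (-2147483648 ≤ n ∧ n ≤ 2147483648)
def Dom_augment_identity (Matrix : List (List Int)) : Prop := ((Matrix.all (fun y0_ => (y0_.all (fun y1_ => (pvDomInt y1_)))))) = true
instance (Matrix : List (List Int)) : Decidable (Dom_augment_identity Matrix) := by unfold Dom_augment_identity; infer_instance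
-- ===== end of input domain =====

-- B folds once over the rows carrying a rotating unit vector as the identity row to append,
-- instead of A's identity() helper (zero-fill pass + diagonal-set pass) plus an index-based append loop.

-- ===== PORT A =====
-- port of the helper identity(N, c): zero matrix pass, then diagonal-assignment pass
def identityA (N : Int) (c : Int) : List (List Int) :=
  let id_matrix := (PySem.List.pyRange 0 N 1).foldl
    (fun acc _ => acc ++ [PySem.List.pyRepeat [(0 : Int)] N]) []
  (PySem.List.pyRange 0 N 1).foldl
    (fun acc i => PySem.List.pySetD acc i (PySem.List.pySetD (PySem.List.pyGetD acc i []) i c))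
    id_matrix

def augment_identity (Matrix : List (List Int)) : List (List Int) :=
  match PySem.List.pyGet? Matrix 0 with
  | none => []  -- Matrix[0] raises IndexError; excluded by Pre_
  | some row0 =>
    if (Matrix.length : Int) ≠ (row0.length : Int) then []  -- raise Exception; excluded by Pre_
    else
      let size : Int := Matrix.length
      let identity_matrix := identityA size 1
      (PySem.List.pyRange 0 (Matrix.length : Int) 1).foldl
        (fun acc row_index =>
          acc ++ [PySem.List.pyGetD Matrix row_index [] ++ PySem.List.pyGetD identity_matrix row_index []])
        []

-- ===== PORT B =====
-- e = [e[-1]] + e[:-1]  (rotate right; e is nonempty on every admitted input)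
def rotRight (e : List Int) : List Int :=
  match PySem.List.pyGet? e (-1) with
  | none => []  -- e[-1] would raise IndexError; unreachable under Pre_
  | some x => x :: PySem.List.slice e none (some (-1))

def augment_identity_alt (Matrix : List (List Int)) : List (List Int) :=
  match PySem.List.pyGet? Matrix 0 with
  | none => []  -- IndexError; excluded by Pre_
  | some row0 =>
    if (Matrix.length : Int) ≠ (row0.length : Int) then []  -- Exception; excluded by Pre_
    else
      let e0 : List Int := [1] ++ PySem.List.pyRepeat [(0 : Int)] ((Matrix.length : Int) - 1)
      (Matrix.foldl
        (fun (st : List (List Int) × List Int) row => (st.1 ++ [row ++ st.2], rotRight st.2))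
        ([], e0)).1

-- ===== PRECONDITION & SPEC =====
-- Pre_ excludes exactly the inputs where A raises: the empty matrix (IndexError on Matrix[0])
-- and non-square matrices (explicit Exception); B raises identically there.
def Pre_augment_identity (Matrix : List (List Int)) : Prop :=
  Matrix ≠ [] ∧ Matrix.length = (Matrix.headD []).length
instance (Matrix : List (List Int)) : Decidable (Pre_augment_identity Matrix) := by
  unfold Pre_augment_identity; infer_instance
def pvWitness_augment_identity : List (List Int) := [[1, 2], [3, 4]]
def Spec_augment_identity (Matrix : List (List Int)) (out : List (List Int)) : Prop := out = augment_identity_alt Matrix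
instance (Matrix : List (List Int)) (out : List (List Int)) : Decidable (Spec_augment_identity Matrix out) := by unfold Spec_augment_identity; infer_instance

-- ===== CLAIM (what is proved, stated in full; the proofs are below) =====
def Claim_equal_augment_identity : Prop := ∀ (Matrix : List (List Int)), Dom_augment_identity Matrix → Pre_augment_identity Matrix → Spec_augment_identity Matrix (augment_identity Matrix)

-- ===== LEMMAS AND PROOFS =====

-- the j-th unit row of size n
def unitRow (n j : Nat) : List Int := List.replicate j 0 ++ 1 :: List.replicate (n - 1 - j) 0

lemma length_unitRow (n j : Nat) (h : j < n) : (unitRow n j).length = n := by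
  simp [unitRow]; omega

lemma unitRow_getElem (n j t : Nat) (hj : j < n) (ht : t < (unitRow n j).length) :
    (unitRow n j)[t] = if t = j then 1 else 0 := by
  rw [length_unitRow n j hj] at ht
  unfold unitRow
  rcases lt_trichotomy t j with h | h | h
  · rw [List.getElem_append_left (by simpa using h)]
    simp [List.getElem_replicate, Nat.ne_of_lt h]
  · subst h
    rw [List.getElem_append_right (by simp)]
    simp
  · rw [List.getElem_append_right (by simp; omega)]
    have : t - j ≠ 0 := by omega
    rcases Nat.exists_eq_succ_of_ne_zero this with ⟨m, hm⟩
    simp only [List.length_replicate, hm, List.getElem_cons_succ, List.getElem_replicate]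
    simp [Nat.ne_of_gt h]

-- rotate-right maps the k-th unit row to the (k+1)-th while k+1 < n
lemma rotRight_unitRow (n k : Nat) (h : k + 1 < n) :
    rotRight (unitRow n k) = unitRow n (k + 1) := by
  have hne : unitRow n k ≠ [] := by
    intro hc
    have := length_unitRow n k (by omega)
    rw [hc] at this; simp at this; omega
  have hrep : n - 1 - k = (n - 2 - k) + 1 := by omega
  have hsplit : unitRow n k = (List.replicate k (0:Int) ++ 1 :: List.replicate (n - 2 - k) 0) ++ [0] := by
    unfold unitRow
    rw [hrep, List.replicate_succ' (n := n - 2 - k)]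
    simp
  unfold rotRight
  rw [hsplit, PySem.List.pyGet?_neg_one, List.getLast?_concat,
      PySem.List.slice_to_neg_one, List.dropLast_concat]
  unfold unitRow
  rw [show n - 1 - (k + 1) = n - 2 - k by omega]
  simp [List.replicate_succ]

-- one pass of B's fold, starting from the k-th unit row
lemma foldB (n : Nat) (rows : List (List Int)) (k : Nat) (acc : List (List Int))
    (h : k + rows.length ≤ n) (hne : rows ≠ []) :
    (rows.foldl
      (fun (st : List (List Int) × List Int) row => (st.1 ++ [row ++ st.2], rotRight st.2))
      (acc, unitRow n k)).1
    = acc ++ rows.mapIdx (fun i row => row ++ unitRow n (k + i)) := by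
  induction rows generalizing k acc with
  | nil => exact absurd rfl hne
  | cons r rs ih =>
    simp only [List.foldl_cons]
    cases rs with
    | nil => simp
    | cons r' rs' =>
      have hlen : k + 1 + (r' :: rs').length ≤ n := by simp at h ⊢; omega
      rw [rotRight_unitRow n k (by simp at h; omega)]
      rw [ih (k + 1) _ hlen (by simp)]
      have hf : (fun (i : Nat) (row : List Int) => row ++ unitRow n (k + 1 + i))
              = (fun (i : Nat) (row : List Int) => row ++ unitRow n (k + (i + 1))) := by
        funext i row
        rw [show k + 1 + i = k + (i + 1) by omega]
      rw [hf]
      simp [List.mapIdx_cons]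

lemma mapIdx_id' (acc : List (List Int)) : List.mapIdx (fun _ row => row) acc = acc := by
  induction acc with
  | nil => rfl
  | cons a l ih => simp [List.mapIdx_cons, ih]

lemma setloop_eq_mapIdx (m : Nat) (acc : List (List Int)) :
    (PySem.List.pyRange 0 (m : Int) 1).foldl
      (fun acc i => PySem.List.pySetD acc i (PySem.List.pySetD (PySem.List.pyGetD acc i []) i 1))
      acc
    = acc.mapIdx (fun k row => if k < m then PySem.List.pySetD row (k : Int) 1 else row) := by
  induction m generalizing acc with
  | zero =>
    simp [PySem.List.pyRange_one_eq_nil, mapIdx_id']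
  | succ n ih =>
    rw [show ((n + 1 : Nat) : Int) = (n : Int) + 1 by push_cast; ring,
        PySem.List.pyRange_one_succ_right (by positivity), List.foldl_append, ih]
    simp only [List.foldl_cons, List.foldl_nil, PySem.List.pySetD_natCast, PySem.List.pyGetD_natCast]
    apply List.ext_getElem
    · simp
    · intro k hk1 hk2
      simp only [List.length_set, List.length_mapIdx] at hk1 hk2
      rw [List.getElem_set, List.getElem_mapIdx, List.getElem_mapIdx]
      by_cases hkm : k = n
      · simp [hkm]
        rw [List.getElem?_eq_getElem (hkm ▸ hk2)]
        simp
      · have : k < n ↔ k < n + 1 := by omega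
        simp [this]
        intro h; exact absurd h.symm hkm

-- the identity-matrix row: row j of identityA N 1 is the j-th unit row
lemma identityA_row (N : Nat) (j : Int) (h0 : 0 ≤ j) (hj : j < (N : Int)) :
    PySem.List.pyGetD (identityA (N : Int) 1) j []
      = (PySem.List.pyRange 0 (N : Int) 1).map (fun k => if k == j then (1 : Int) else 0) := by
  have hjn : j = ((j.toNat : Nat) : Int) := by omega
  have hjN : j.toNat < N := by omega
  unfold identityA
  rw [PySem.List.foldl_append_singleton_eq_map, setloop_eq_mapIdx]
  rw [hjn, PySem.List.pyGetD_natCast]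
  have hlen : (List.mapIdx (fun k row => if k < N then PySem.List.pySetD row (k : Int) 1 else row)
      ([] ++ (PySem.List.pyRange 0 (N : Int) 1).map (fun _ => PySem.List.pyRepeat [(0:Int)] (N : Int)))).length = N := by
    simp [PySem.List.length_pyRange_one]
  rw [List.getD_eq_getElem _ _ (by omega : j.toNat < _), List.getElem_mapIdx]
  have hpy : PySem.List.pyRepeat [(0:Int)] (N : Int) = List.replicate N (0:Int) := by
    rw [PySem.List.pyRepeat_singleton]; simp
  apply List.ext_getElem
  · simp [PySem.List.length_pyRange_one, hpy, hjN]
  · intro t ht1 ht2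
    simp only [List.nil_append, List.getElem_map, PySem.List.getElem_pyRange_one]
    have htN : t < N := by simpa [PySem.List.length_pyRange_one] using ht2
    simp only [if_pos hjN, PySem.List.pySetD_natCast] at ht1 ⊢
    rw [List.getElem_set]
    by_cases he : j.toNat = t
    · simp [he]
    · simp [he, List.getElem_replicate]
      omega

-- the pyRange characterisation of A's identity row is the unit row
lemma identrow_eq_unitRow (n j : Nat) (hj : j < n) :
    (PySem.List.pyRange 0 (n : Int) 1).map (fun k => if k == (j : Int) then (1 : Int) else 0)
    = unitRow n j := by
  apply List.ext_getElem
  · simp [PySem.List.length_pyRange_one, length_unitRow n j hj]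
  · intro t ht1 ht2
    have htn : t < n := by simpa [PySem.List.length_pyRange_one] using ht1
    rw [unitRow_getElem n j t hj ht2]
    simp only [List.getElem_map, PySem.List.getElem_pyRange_one]
    by_cases he : t = j
    · simp [he]
    · simp [he]

-- ===== VERDICT (by name: the statement is the Claim_ definition above) =====
theorem augment_identity_spec : Claim_equal_augment_identity := by
  intro Matrix _ hpre
  unfold Spec_augment_identity
  obtain ⟨hne, hsq⟩ := hpre
  cases Matrix with
  | nil => exact absurd rfl hne
  | cons r rs =>
    have hget : PySem.List.pyGet? (r :: rs) 0 = some r := by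
      simp [PySem.List.pyGet?, PySem.List.pyIdx?]
    simp only [augment_identity, augment_identity_alt, hget]
    have hsq' : (((r :: rs).length : Nat) : Int) = (r.length : Int) := by
      simp at hsq; exact_mod_cast hsq
    rw [if_neg (by omega), if_neg (by omega)]
    set n : Nat := (r :: rs).length with hn
    have he0 : ([1] ++ PySem.List.pyRepeat [(0 : Int)] ((n : Int) - 1)) = unitRow n 0 := by
      have : ((n : Int) - 1) = ((n - 1 : Nat) : Int) := by simp [hn]
      rw [this, PySem.List.pyRepeat_singleton]
      simp [unitRow]
    rw [PySem.List.foldl_append_singleton_eq_map]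
    rw [he0, foldB n (r :: rs) 0 [] (by rw [hn]; omega) (by simp)]
    apply List.ext_getElem
    · simp [PySem.List.length_pyRange_one, hn]
    · intro t ht1 ht2
      have htn : t < n := by simpa [PySem.List.length_pyRange_one] using ht1
      simp only [List.getElem_map, PySem.List.getElem_pyRange_one, List.nil_append,
        List.getElem_mapIdx]
      rw [identityA_row n ((0:Int) + t) (by omega) (by omega)]
      rw [show ((0:Int) + t) = ((t : Nat) : Int) by omega]
      rw [identrow_eq_unitRow n t htn, Nat.zero_add]
      congr 1
      rw [PySem.List.pyGetD_natCast]
      exact List.getD_eq_getElem _ _ htn
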